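-- pv_equiv track=rewrite | github.com/mhlu/python-algo | matrix_sum.py | sum_helper
-- ===== SOURCE A (Python) =====
-- def sum_helper(matrix, si, sj, m, n):
--     if m == 0 or n == 0:
--         return 0
--     if m == 1 and n == 1:
--         return matrix[si][sj]
--
--     return sum_helper(matrix, si, sj, m//2, n//2) +\
--             sum_helper(matrix, si+m//2, sj, m-m//2, n//2) +\
--             sum_helper(matrix, si, sj+n//2, m//2, n-n//2) +\
--             sum_helper(matrix, si+m//2, sj+n//2, m-m//2, n-n//2)
-- ===== SOURCE B (Python) =====
-- def sum_helper(matrix, si, sj, m, n):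
--     return sum(matrix[i][j]
--                for i in range(si, si + m)
--                for j in range(sj, sj + n))
-- ===== Notes on version B (the rewrite author's own statement) =====
-- stated objective: simpler
-- what changed: Replaces the four-way quadrant recursion with a single flat generator-expression sum over matrix[i][j] for i in [si, si+m) and j in [sj, sj+n).
import Mathlib
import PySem

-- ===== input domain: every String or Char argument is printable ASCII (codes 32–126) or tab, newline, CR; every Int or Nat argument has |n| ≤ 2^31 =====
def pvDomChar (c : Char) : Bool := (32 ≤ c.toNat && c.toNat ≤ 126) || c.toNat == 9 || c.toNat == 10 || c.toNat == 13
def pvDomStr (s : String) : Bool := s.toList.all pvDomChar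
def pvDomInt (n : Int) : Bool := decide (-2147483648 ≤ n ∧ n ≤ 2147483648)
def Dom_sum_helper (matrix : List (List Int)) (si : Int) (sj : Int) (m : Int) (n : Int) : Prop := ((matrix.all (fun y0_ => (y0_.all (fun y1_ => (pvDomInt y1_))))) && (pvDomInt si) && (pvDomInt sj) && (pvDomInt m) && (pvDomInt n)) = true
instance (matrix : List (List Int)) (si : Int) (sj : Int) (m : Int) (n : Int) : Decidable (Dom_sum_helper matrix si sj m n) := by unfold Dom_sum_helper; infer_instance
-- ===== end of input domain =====

-- B replaces A's four-way quadrant recursion by a single flat generator-expression sum over the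
-- m×n block (objective: simpler).  Equivalence is about return values; neither mutates its input.

-- ===== PORT A =====
-- Literal port of the quadrant recursion.  The fuel argument is ONLY a totality device: every
-- recursive call strictly decreases m.toNat + n.toNat, so the fuel sum_helper passes is never
-- exhausted on inputs where Python A returns; it runs out only where a dimension is negative
-- with the other nonzero, where Python A never terminates (RecursionError) — outside Pre_.
-- matrix[si][sj] is ported as PySem.List.pyGetD with defaults; the defaults are never used under Pre_.
def sum_helper_go (matrix : List (List Int)) : Nat → Int → Int → Int → Int → Int
  | 0, _, _, _, _ => 0   -- fuel exhausted: unreachable under Pre_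
  | fuel + 1, si, sj, m, n =>
    if m = 0 ∨ n = 0 then 0
    else if m = 1 ∧ n = 1 then PySem.List.pyGetD (PySem.List.pyGetD matrix si []) sj 0
    else
      sum_helper_go matrix fuel si sj (PySem.Int.floordiv m 2) (PySem.Int.floordiv n 2) +
      sum_helper_go matrix fuel (si + PySem.Int.floordiv m 2) sj (m - PySem.Int.floordiv m 2) (PySem.Int.floordiv n 2) +
      sum_helper_go matrix fuel si (sj + PySem.Int.floordiv n 2) (PySem.Int.floordiv m 2) (n - PySem.Int.floordiv n 2) +
      sum_helper_go matrix fuel (si + PySem.Int.floordiv m 2) (sj + PySem.Int.floordiv n 2) (m - PySem.Int.floordiv m 2) (n - PySem.Int.floordiv n 2)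

def sum_helper (matrix : List (List Int)) (si : Int) (sj : Int) (m : Int) (n : Int) : Int :=
  sum_helper_go matrix (m.toNat + n.toNat + 1) si sj m n

-- ===== PORT B =====
-- Port of Source B: sum(matrix[i][j] for i in range(si, si+m) for j in range(sj, sj+n)).
def sum_helper_alt (matrix : List (List Int)) (si : Int) (sj : Int) (m : Int) (n : Int) : Int :=
  ((PySem.List.pyRange si (si + m) 1).flatMap (fun i =>
    (PySem.List.pyRange sj (sj + n) 1).map (fun j =>
      PySem.List.pyGetD (PySem.List.pyGetD matrix i []) j 0))).sum

-- ===== PRECONDITION & SPEC =====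
-- Pre_ = exactly the inputs on which Python A returns: m = 0 or n = 0 (immediate 0), or both
-- dimensions positive, all row indices si..si+m-1 valid Python indices into matrix (negative
-- indices wrap), and sj..sj+n-1 valid Python indices into each row so addressed (an invalid
-- index is an IndexError; a negative dimension with the other dimension nonzero never
-- terminates, RecursionError — B's empty ranges simply yield 0 there).
def Pre_sum_helper (matrix : List (List Int)) (si : Int) (sj : Int) (m : Int) (n : Int) : Prop :=
  m = 0 ∨ n = 0 ∨ (0 < m ∧ 0 < n ∧
    (-(matrix.length : Int) ≤ si ∧ si + m ≤ matrix.length) ∧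
    ∀ p ∈ PySem.List.enumerate matrix,
      ((si ≤ p.1 ∧ p.1 < si + m) ∨ (si ≤ p.1 - matrix.length ∧ p.1 - matrix.length < si + m)) →
      (-(p.2.length : Int) ≤ sj ∧ sj + n ≤ p.2.length))
instance (matrix : List (List Int)) (si : Int) (sj : Int) (m : Int) (n : Int) : Decidable (Pre_sum_helper matrix si sj m n) := by unfold Pre_sum_helper; infer_instance
def pvWitness_sum_helper : List (List Int) × Int × Int × Int × Int := ([[1, 2], [3, 4]], 0, 0, 2, 2)

def Spec_sum_helper (matrix : List (List Int)) (si : Int) (sj : Int) (m : Int) (n : Int) (out : Int) : Prop := out = sum_helper_alt matrix si sj m n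
instance (matrix : List (List Int)) (si : Int) (sj : Int) (m : Int) (n : Int) (out : Int) : Decidable (Spec_sum_helper matrix si sj m n out) := by unfold Spec_sum_helper; infer_instance

-- ===== CLAIM (what is proved, stated in full; the proofs are below) =====
def Claim_equal_sum_helper : Prop := ∀ (matrix : List (List Int)) (si : Int) (sj : Int) (m : Int) (n : Int), Dom_sum_helper matrix si sj m n → Pre_sum_helper matrix si sj m n → Spec_sum_helper matrix si sj m n (sum_helper matrix si sj m n)

-- ===== LEMMAS AND PROOFS =====

-- The common double sum both ports compute: rows si..si+p-1, columns sj..sj+q-1.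
def pvS (matrix : List (List Int)) (si : Int) (sj : Int) (p q : Nat) : Int :=
  ((List.range p).map (fun (a : Nat) =>
    ((List.range q).map (fun (b : Nat) =>
      PySem.List.pyGetD (PySem.List.pyGetD matrix (si + (a : Int)) []) (sj + (b : Int)) 0)).sum)).sum

lemma pvS_split_rows (matrix : List (List Int)) (si sj : Int) (a b q : Nat) :
    pvS matrix si sj (a + b) q = pvS matrix si sj a q + pvS matrix (si + (a : Int)) sj b q := by
  unfold pvS
  rw [List.range_add, List.map_append, List.sum_append, List.map_map]
  congr 1
  apply congrArg List.sum
  apply List.map_congr_left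
  intro x _
  simp only [Function.comp]
  have h : si + ((a + x : Nat) : Int) = si + (a : Int) + (x : Int) := by push_cast; ring
  rw [h]

lemma pvS_split_cols (matrix : List (List Int)) (si sj : Int) (p a b : Nat) :
    pvS matrix si sj p (a + b) = pvS matrix si sj p a + pvS matrix si (sj + (a : Int)) p b := by
  unfold pvS
  rw [← PySem.List.sum_map_add_int]
  apply congrArg List.sum
  apply List.map_congr_left
  intro x _
  rw [List.range_add, List.map_append, List.sum_append, List.map_map]
  congr 1
  apply congrArg List.sum
  apply List.map_congr_left
  intro y _
  simp only [Function.comp]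
  have h : sj + ((a + y : Nat) : Int) = sj + (a : Int) + (y : Int) := by push_cast; ring
  rw [h]

-- The quadrant recursion computes the double sum whenever its fuel exceeds the measure
-- m.toNat + n.toNat that every recursive call strictly decreases.
lemma sum_helper_go_eq_pvS : ∀ (fuel : Nat) (matrix : List (List Int)) (si sj m n : Int),
    0 ≤ m → 0 ≤ n → m.toNat + n.toNat < fuel →
    sum_helper_go matrix fuel si sj m n = pvS matrix si sj m.toNat n.toNat := by
  intro fuel
  induction fuel with
  | zero => intro _ _ _ _ _ _ _ hk; omega
  | succ fuel ih =>
    intro matrix si sj m n hm hn hk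
    rw [sum_helper_go]
    by_cases h0 : m = 0 ∨ n = 0
    · rw [if_pos h0]
      rcases h0 with h | h <;> subst h <;> simp [pvS]
    · rw [if_neg h0]
      simp only [not_or] at h0
      by_cases h11 : m = 1 ∧ n = 1
      · rw [if_pos h11]
        obtain ⟨hm', hn'⟩ := h11; subst hm'; subst hn'
        simp [pvS]
      · rw [if_neg h11]
        have hfm : PySem.Int.floordiv m 2 = m / 2 := PySem.Int.floordiv_eq_ediv_of_pos (by omega)
        have hfn : PySem.Int.floordiv n 2 = n / 2 := PySem.Int.floordiv_eq_ediv_of_pos (by omega)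
        rw [hfm, hfn]
        simp only [not_and_or] at h11
        rw [ih matrix si sj _ _ (by omega) (by omega) (by omega),
            ih matrix _ sj _ _ (by omega) (by omega) (by omega),
            ih matrix si _ _ _ (by omega) (by omega) (by omega),
            ih matrix _ _ _ _ (by omega) (by omega) (by omega)]
        have hmsplit : m.toNat = (m / 2).toNat + (m - m / 2).toNat := by omega
        have hnsplit : n.toNat = (n / 2).toNat + (n - n / 2).toNat := by omega
        have hcm : (((m / 2).toNat : Int)) = m / 2 := by omega
        have hcn : (((n / 2).toNat : Int)) = n / 2 := by omega
        rw [hmsplit, hnsplit, pvS_split_rows, pvS_split_cols, pvS_split_cols, hcm, hcn]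
        ring

lemma sum_helper_alt_eq_pvS (matrix : List (List Int)) (si sj m n : Int)
    (hm : 0 ≤ m) (hn : 0 ≤ n) :
    sum_helper_alt matrix si sj m n = pvS matrix si sj m.toNat n.toNat := by
  unfold sum_helper_alt pvS
  rw [PySem.List.pyRange_one si (si + m), PySem.List.pyRange_one sj (sj + n)]
  have h1 : (si + m - si).toNat = m.toNat := by omega
  have h2 : (sj + n - sj).toNat = n.toNat := by omega
  rw [h1, h2, List.flatMap_map, List.flatMap_def, List.sum_flatten, List.map_map]
  apply congrArg List.sum
  apply List.map_congr_left
  intro x _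
  simp only [Function.comp, List.map_map]
  rfl

lemma pv_ports_agree (matrix : List (List Int)) (si sj m n : Int)
    (hm : 0 ≤ m) (hn : 0 ≤ n) :
    sum_helper matrix si sj m n = sum_helper_alt matrix si sj m n := by
  rw [sum_helper, sum_helper_go_eq_pvS _ matrix si sj m n hm hn (by omega),
      sum_helper_alt_eq_pvS matrix si sj m n hm hn]

-- ===== VERDICT (by name: the statement is the Claim_ definition above) =====
theorem sum_helper_spec : Claim_equal_sum_helper := by
  intro matrix si sj m n _ hpre
  unfold Spec_sum_helper
  rcases hpre with h | h | h
  · -- m = 0: A short-circuits to 0, B's outer range is empty (n may be negative here)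
    subst h
    by_cases hn : 0 ≤ n
    · exact pv_ports_agree matrix si sj 0 n le_rfl hn
    · rw [sum_helper, sum_helper_go, if_pos (Or.inl rfl)]
      unfold sum_helper_alt
      rw [PySem.List.pyRange_one_eq_nil (by omega : si + 0 ≤ si)]
      simp
  · -- n = 0: A short-circuits to 0, B's inner ranges are empty (m may be negative here)
    subst h
    rw [sum_helper, sum_helper_go, if_pos (Or.inr rfl)]
    unfold sum_helper_alt
    rw [PySem.List.pyRange_one_eq_nil (by omega : sj + 0 ≤ sj)]
    simp [List.flatMap_def]
  · exact pv_ports_agree matrix si sj m n (by omega) (by omega)
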